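-- pv_equiv track=rewrite | github.com/ravipangali7/Infelo-Hub | server/core/views/client_area/product_views.py | _category_ids_for_section
-- ===== SOURCE A (Python) =====
-- def _category_ids_for_section(parent_id, mode, children_map):
--     if mode == 'direct':
--         return [parent_id]
--     stack = [parent_id]
--     out = []
--     seen = set()
--     while stack:
--         cid = stack.pop()
--         if cid in seen:
--             continue
--         seen.add(cid)
--         out.append(cid)
--         stack.extend(children_map.get(cid, ()))
--     return out
-- ===== SOURCE B (Python) =====
-- def _category_ids_for_section(parent_id, mode, children_map):
--     if mode == 'direct':
--         return [parent_id]
--     seen = set()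
--     out = []
--     def visit(cid):
--         if cid in seen:
--             return
--         seen.add(cid)
--         out.append(cid)
--         for child in reversed(children_map.get(cid, ())):
--             visit(child)
--     visit(parent_id)
--     return out
-- ===== Notes on version B (the rewrite author's own statement) =====
-- stated objective: alternative
-- what changed: A's explicit stack/while DFS loop with LIFO pops is replaced by a recursive visit(cid) helper closing over shared seen/out state and iterating children in reversed order to reproduce the pop order.
import Mathlib
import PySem

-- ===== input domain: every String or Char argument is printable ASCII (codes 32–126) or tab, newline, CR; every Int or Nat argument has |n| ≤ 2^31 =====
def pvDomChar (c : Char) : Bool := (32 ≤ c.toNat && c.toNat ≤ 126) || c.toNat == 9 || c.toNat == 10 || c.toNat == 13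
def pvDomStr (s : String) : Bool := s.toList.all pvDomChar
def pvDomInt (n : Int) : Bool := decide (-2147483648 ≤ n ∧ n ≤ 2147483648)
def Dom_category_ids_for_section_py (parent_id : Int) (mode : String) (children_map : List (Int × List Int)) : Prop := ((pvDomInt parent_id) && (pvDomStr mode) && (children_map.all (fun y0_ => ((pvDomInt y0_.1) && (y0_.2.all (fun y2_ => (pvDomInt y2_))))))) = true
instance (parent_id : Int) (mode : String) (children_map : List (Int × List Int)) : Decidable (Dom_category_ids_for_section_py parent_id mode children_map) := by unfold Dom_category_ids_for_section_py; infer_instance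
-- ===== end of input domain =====

-- B replaces A's explicit stack/while DFS loop by a recursive visit helper over children in
-- reversed order (same values; a different decomposition, objective: alternative/simpler).

-- children_map.get(cid, ()) — first-match dict lookup with empty default
def pvKids (cm : List (Int × List Int)) (cid : Int) : List Int :=
  PySem.Dict.getD ⟨cm⟩ cid []

-- ids occurring anywhere in children_map (keys and children); only used by termination measures
def pvUniv (cm : List (Int × List Int)) : List Int :=
  cm.flatMap (fun p => p.1 :: p.2)

def pvS (cm : List (Int × List Int)) : Nat :=
  (cm.map (fun p => p.2.length)).sum

-- number of ids of pvUniv not yet seen (termination measure component)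
def pvRem (cm : List (Int × List Int)) (seen : PySem.Set Int) : Nat :=
  (pvUniv cm).dedup.countP (fun x => decide (x ∉ seen))

lemma pvKids_length_le (cm : List (Int × List Int)) (cid : Int) :
    (pvKids cm cid).length ≤ pvS cm := by
  induction cm with
  | nil => simp [pvKids, PySem.Dict.getD, PySem.Dict.get?, pvS]
  | cons p rest ih =>
    simp only [pvKids, PySem.Dict.getD] at *
    rw [show (⟨p :: rest⟩ : PySem.Dict Int (List Int)) = ⟨(p.1, p.2) :: rest⟩ by rfl,
        PySem.Dict.get?_mk_cons]
    by_cases h : (p.1 == cid) = true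
    · simp [h, pvS]
    · simp only [h, Bool.false_eq_true, if_false]
      have := ih
      simp only [pvS, List.map_cons, List.sum_cons] at this ⊢
      omega

lemma pvKids_eq_nil_of_not_mem (cm : List (Int × List Int)) (cid : Int)
    (h : cid ∉ pvUniv cm) : pvKids cm cid = [] := by
  induction cm with
  | nil => rfl
  | cons p rest ih =>
    simp only [pvUniv, List.flatMap_cons, List.mem_append, List.mem_cons] at h
    push_neg at h
    simp only [pvKids, PySem.Dict.getD] at *
    rw [show (⟨p :: rest⟩ : PySem.Dict Int (List Int)) = ⟨(p.1, p.2) :: rest⟩ by rfl,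
        PySem.Dict.get?_mk_cons]
    have hne : (p.1 == cid) = false := by
      simp only [beq_eq_false_iff_ne, ne_eq]
      exact fun he => h.1.1 he.symm
    simp only [hne, Bool.false_eq_true, if_false]
    exact ih (by simpa [pvUniv] using h.2)

lemma pvRem_add_lt (cm : List (Int × List Int)) (seen : PySem.Set Int) (cid : Int)
    (hu : cid ∈ pvUniv cm) (hs : cid ∉ seen) :
    pvRem cm (seen.add cid) + 1 ≤ pvRem cm seen := by
  have hd : cid ∈ (pvUniv cm).dedup := List.mem_dedup.2 hu
  obtain ⟨l1, l2, hsplit⟩ := List.append_of_mem hd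
  unfold pvRem
  rw [hsplit, List.countP_append, List.countP_append, List.countP_cons, List.countP_cons]
  have h1 : (decide (cid ∉ seen.add cid)) = false := by
    simp [PySem.Set.mem_add]
  have h2 : (decide (cid ∉ seen)) = true := by simpa using hs
  have m1 : (l1.countP fun x => decide (x ∉ seen.add cid)) ≤ l1.countP fun x => decide (x ∉ seen) := by
    apply List.countP_mono_left
    intro x _ hx
    simp only [decide_eq_true_eq, PySem.Set.mem_add] at *
    exact fun hm => hx (Or.inl hm)
  have m2 : (l2.countP fun x => decide (x ∉ seen.add cid)) ≤ l2.countP fun x => decide (x ∉ seen) := by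
    apply List.countP_mono_left
    intro x _ hx
    simp only [decide_eq_true_eq, PySem.Set.mem_add] at *
    exact fun hm => hx (Or.inl hm)
  simp only [h1, h2, if_false, if_true, Bool.false_eq_true]
  omega

lemma pvRem_add_eq (cm : List (Int × List Int)) (seen : PySem.Set Int) (cid : Int)
    (hu : cid ∉ pvUniv cm) : pvRem cm (seen.add cid) = pvRem cm seen := by
  unfold pvRem
  apply List.countP_congr
  intro x hx
  have hxu : x ∈ pvUniv cm := List.mem_dedup.1 hx
  have hne : x ≠ cid := fun he => hu (he ▸ hxu)
  simp [PySem.Set.mem_add, hne]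

-- ===== PORT A =====
-- the while-loop of A: pop from the end of stack, skip seen ids, else record and push children
def loopA (cm : List (Int × List Int)) (stack out : List Int) (seen : PySem.Set Int) : List Int :=
  match h : PySem.List.pop? stack with
  | none => out
  | some (cid, rest) =>
    if cid ∈ seen then loopA cm rest out seen
    else loopA cm (rest ++ pvKids cm cid) (out ++ [cid]) (seen.add cid)
termination_by pvRem cm seen * (pvS cm + 1) + stack.length
decreasing_by
  · have hlen := PySem.List.length_of_pop?_eq_some stack h
    simp only at hlen
    omega
  · have hlen := PySem.List.length_of_pop?_eq_some stack h
    simp only at hlen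
    have hk := pvKids_length_le cm cid
    rw [List.length_append]
    by_cases hu : cid ∈ pvUniv cm
    · have h4 := pvRem_add_lt cm seen cid hu (by assumption)
      have hm := Nat.mul_le_mul_right (pvS cm + 1) h4
      simp only [Nat.add_mul, Nat.one_mul] at hm
      omega
    · rw [pvKids_eq_nil_of_not_mem cm cid hu, pvRem_add_eq cm seen cid hu]
      simp only [List.length_nil]
      omega

def category_ids_for_section_py (parent_id : Int) (mode : String) (children_map : List (Int × List Int)) : List Int :=
  if mode = "direct" then [parent_id]
  else loopA children_map [parent_id] [] PySem.Set.empty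

-- ===== PORT B =====
-- recursive visit(cid) threading (out, seen); the Nat argument is ONLY a totality guard (fuel):
-- pvFuel below provably suffices, B's Python has no such bound
mutual
def visitB (cm : List (Int × List Int)) : Nat → Int → (List Int × PySem.Set Int) → (List Int × PySem.Set Int)
  | 0, _, s => s
  | f + 1, cid, s =>
    if cid ∈ s.2 then s
    else visitListB cm f (pvKids cm cid).reverse (s.1 ++ [cid], s.2.add cid)
termination_by f _ _ => (f, 0)

def visitListB (cm : List (Int × List Int)) : Nat → List Int → (List Int × PySem.Set Int) → (List Int × PySem.Set Int)
  | _, [], s => s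
  | f, c :: cs, s => visitListB cm f cs (visitB cm f c s)
termination_by f cs _ => (f, cs.length + 1)
end

def pvFuel (cm : List (Int × List Int)) : Nat := (pvUniv cm).dedup.length + 1

def category_ids_for_section_py_alt (parent_id : Int) (mode : String) (children_map : List (Int × List Int)) : List Int :=
  if mode = "direct" then [parent_id]
  else (visitB children_map (pvFuel children_map) parent_id ([], PySem.Set.empty)).1

-- ===== PRECONDITION & SPEC =====
def Spec_category_ids_for_section_py (parent_id : Int) (mode : String) (children_map : List (Int × List Int)) (out : List Int) : Prop := out = category_ids_for_section_py_alt parent_id mode children_map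
instance (parent_id : Int) (mode : String) (children_map : List (Int × List Int)) (out : List Int) : Decidable (Spec_category_ids_for_section_py parent_id mode children_map out) := by unfold Spec_category_ids_for_section_py; infer_instance

-- ===== CLAIM (what is proved, stated in full; the proofs are below) =====
def Claim_equal_category_ids_for_section_py : Prop := ∀ (parent_id : Int) (mode : String) (children_map : List (Int × List Int)), Dom_category_ids_for_section_py parent_id mode children_map → Spec_category_ids_for_section_py parent_id mode children_map (category_ids_for_section_py parent_id mode children_map)

-- ===== LEMMAS AND PROOFS =====

lemma pvRem_mono (cm : List (Int × List Int)) {seen seen' : PySem.Set Int}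
    (h : ∀ x, x ∈ seen → x ∈ seen') : pvRem cm seen' ≤ pvRem cm seen := by
  apply List.countP_mono_left
  intro x _ hx
  simp only [decide_eq_true_eq] at *
  exact fun hm => hx (h x hm)

lemma pv_pop_concat {stack : List Int} {cid : Int} {rest : List Int}
    (h : PySem.List.pop? stack = some (cid, rest)) : stack = rest ++ [cid] := by
  rcases List.eq_nil_or_concat stack with rfl | ⟨ys, y, rfl⟩
  · simp [PySem.List.pop?, PySem.List.pyIdx?] at h
  · rw [List.concat_eq_append] at h ⊢
    rw [PySem.List.pop?_last] at h
    obtain ⟨h1, h2⟩ := Prod.mk.injEq .. ▸ (Option.some.injEq .. ▸ h)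
    rw [← h1, ← h2]


-- seen only grows through visitB / visitListB
lemma pv_mono (cm : List (Int × List Int)) : ∀ f : Nat,
    (∀ (cid : Int) (s : List Int × PySem.Set Int) (x : Int), x ∈ s.2 → x ∈ (visitB cm f cid s).2) ∧
    (∀ (cs : List Int) (s : List Int × PySem.Set Int) (x : Int), x ∈ s.2 → x ∈ (visitListB cm f cs s).2) := by
  intro f
  induction f with
  | zero =>
    constructor
    · intro cid s x hx; simpa [visitB] using hx
    · intro cs
      induction cs with
      | nil => intro s x hx; simpa [visitListB] using hx
      | cons c cs ih => intro s x hx; simp only [visitListB]; exact ih _ _ (by simpa [visitB] using hx)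
  | succ f ih =>
    have hB : ∀ (cid : Int) (s : List Int × PySem.Set Int) (x : Int), x ∈ s.2 → x ∈ (visitB cm (f + 1) cid s).2 := by
      intro cid s x hx
      simp only [visitB]
      split
      · exact hx
      · exact ih.2 _ _ x ((PySem.Set.mem_add s.2 cid x).2 (Or.inl hx))
    refine ⟨hB, ?_⟩
    intro cs
    induction cs with
    | nil => intro s x hx; simpa [visitListB] using hx
    | cons c cs ihc => intro s x hx; simp only [visitListB]; exact ihc _ _ (hB c s x hx)

-- fuel irrelevance: any two sufficient fuels give the same result
lemma pv_fi (cm : List (Int × List Int)) : ∀ f g : Nat,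
    (∀ (cid : Int) (s : List Int × PySem.Set Int), pvRem cm s.2 < f → pvRem cm s.2 < g →
      visitB cm f cid s = visitB cm g cid s) ∧
    (∀ (cs : List Int) (s : List Int × PySem.Set Int), pvRem cm s.2 < f → pvRem cm s.2 < g →
      visitListB cm f cs s = visitListB cm g cs s) := by
  intro f
  induction f with
  | zero => intro g; exact ⟨fun _ _ h _ => absurd h (by omega), fun _ _ h _ => absurd h (by omega)⟩
  | succ f ih =>
    intro g
    match g with
    | 0 => exact ⟨fun _ _ _ h => absurd h (by omega), fun _ _ _ h => absurd h (by omega)⟩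
    | g + 1 =>
      have hB : ∀ (cid : Int) (s : List Int × PySem.Set Int), pvRem cm s.2 < f + 1 → pvRem cm s.2 < g + 1 →
          visitB cm (f + 1) cid s = visitB cm (g + 1) cid s := by
        intro cid s hf hg
        simp only [visitB]
        split
        · rfl
        · rename_i hseen
          by_cases hu : cid ∈ pvUniv cm
          · have h4 := pvRem_add_lt cm s.2 cid hu hseen
            exact (ih g).2 ((pvKids cm cid).reverse) (s.1 ++ [cid], s.2.add cid)
              (show pvRem cm (s.2.add cid) < f by omega)
              (show pvRem cm (s.2.add cid) < g by omega)
          · rw [pvKids_eq_nil_of_not_mem cm cid hu]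
            simp [visitListB]
      refine ⟨hB, ?_⟩
      intro cs
      induction cs with
      | nil => intros; simp [visitListB]
      | cons c cs ihc =>
        intro s hf hg
        simp only [visitListB]
        rw [← hB c s hf hg]
        have hsub := (pv_mono cm (f + 1)).1 c s
        have hle : pvRem cm (visitB cm (f + 1) c s).2 ≤ pvRem cm s.2 := pvRem_mono cm hsub
        exact ihc (visitB cm (f + 1) c s)
          (show pvRem cm (visitB cm (f + 1) c s).2 < f + 1 by omega)
          (show pvRem cm (visitB cm (f + 1) c s).2 < g + 1 by omega)

-- visitListB distributes over append at fixed fuel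
lemma pv_append (cm : List (Int × List Int)) (f : Nat) :
    ∀ (xs ys : List Int) (s : List Int × PySem.Set Int),
      visitListB cm f (xs ++ ys) s = visitListB cm f ys (visitListB cm f xs s) := by
  intro xs
  induction xs with
  | nil => intros; simp [visitListB]
  | cons x xs ih => intro ys s; simp only [List.cons_append, visitListB]; exact ih ys _

-- the bridge: A's stack loop equals B's recursive visits of the reversed stack
lemma pv_bridge (cm : List (Int × List Int)) :
    ∀ (stack out : List Int) (seen : PySem.Set Int) (f : Nat), pvRem cm seen < f →
      loopA cm stack out seen = (visitListB cm f stack.reverse (out, seen)).1 := by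
  intro stack out seen
  induction stack, out, seen using loopA.induct cm with
  | case1 stack out seen h =>
    intro f hf
    rw [loopA]
    split
    · rcases List.eq_nil_or_concat stack with rfl | ⟨ys, y, rfl⟩
      · simp [visitListB]
      · rw [List.concat_eq_append, PySem.List.pop?_last] at h; exact absurd h (by simp)
    · rename_i heq; rw [h] at heq; exact absurd heq (by simp)
  | case2 stack out seen cid rest h hseen ih =>
    intro f hf
    have hstack := pv_pop_concat h
    rw [loopA]
    split
    · rename_i heq; rw [h] at heq; exact absurd heq (by simp)
    rename_i cid' rest' heq
    rw [h] at heq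
    obtain ⟨hc, hr⟩ := Prod.mk.inj (Option.some.inj heq)
    subst hc; subst hr
    rw [if_pos hseen]
    subst hstack
    match f, hf with
    | f + 1, hf =>
      rw [List.reverse_append, List.reverse_singleton, List.singleton_append, visitListB]
      have : visitB cm (f + 1) cid (out, seen) = (out, seen) := by simp [visitB, hseen]
      rw [this]
      exact ih (f + 1) hf
  | case3 stack out seen cid rest h hseen ih =>
    intro f hf
    have hstack := pv_pop_concat h
    rw [loopA]
    split
    · rename_i heq; rw [h] at heq; exact absurd heq (by simp)
    rename_i cid' rest' heq
    rw [h] at heq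
    obtain ⟨hc, hr⟩ := Prod.mk.inj (Option.some.inj heq)
    subst hc; subst hr
    rw [if_neg hseen]
    subst hstack
    match f, hf with
    | f + 1, hf =>
      rw [List.reverse_append, List.reverse_singleton, List.singleton_append, visitListB]
      have hvb : visitB cm (f + 1) cid (out, seen)
          = visitListB cm f (pvKids cm cid).reverse (out ++ [cid], seen.add cid) := by
        simp [visitB, hseen]
      rw [hvb]
      by_cases hu : cid ∈ pvUniv cm
      · have h4 := pvRem_add_lt cm seen cid hu hseen
        rw [(pv_fi cm f (f + 1)).2 (pvKids cm cid).reverse (out ++ [cid], seen.add cid)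
              (show pvRem cm (seen.add cid) < f by omega)
              (show pvRem cm (seen.add cid) < f + 1 by omega)]
        have happ := pv_append cm (f + 1) (pvKids cm cid).reverse rest.reverse
          (out ++ [cid], seen.add cid)
        rw [← happ, ← List.reverse_append]
        exact ih (f + 1) (by omega)
      · rw [pvKids_eq_nil_of_not_mem cm cid hu] at *
        simp only [List.reverse_nil, visitListB]
        have := ih (f + 1) (by rw [pvRem_add_eq cm seen cid hu]; omega)
        simpa using this

lemma pvRem_lt_fuel (cm : List (Int × List Int)) : pvRem cm PySem.Set.empty < pvFuel cm := by
  unfold pvRem pvFuel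
  have := List.countP_le_length (l := (pvUniv cm).dedup) (p := fun x => decide (x ∉ (PySem.Set.empty : PySem.Set Int)))
  omega

-- ===== VERDICT (by name: the statement is the Claim_ definition above) =====
theorem category_ids_for_section_py_spec : Claim_equal_category_ids_for_section_py := by
  intro parent_id mode children_map _
  unfold Spec_category_ids_for_section_py category_ids_for_section_py category_ids_for_section_py_alt
  split
  · rfl
  · rw [pv_bridge children_map [parent_id] [] PySem.Set.empty (pvFuel children_map)
        (pvRem_lt_fuel children_map)]
    simp [visitListB]
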